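-- pv_equiv track=rewrite | github.com/anilkumarchebrolu/data_structures_and_algo_spec_coursera | algorithmic_toolbox/week2_algorithmic_warmup/7_fibonacci_partial_sum.py | get_fibonacci_huge_efficient
-- ===== SOURCE A (Python) =====
-- def pisanoPeriod(m):
--     previous, current = 0, 1
--     _sum = 1
--     for i in range(0, m * m):
--         previous, current \
--         = current, (previous + current) % m
--         _sum += current
--         # A Pisano Period starts with 01
--         if (previous == 0 and current == 1):
--             return _sum, i + 1
--
-- def get_fibonacci_huge_efficient(n, m=10):
--     one_iter_sum, pp = pisanoPeriod(m)
--     n = n%pp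
--     _sum = 1
--     if n > pp:
--         _sum = one_iter_sum * n
--
--     if n <= 1:
--         return n
--
--     previous = 0
--     current  = 1
--
--     for _ in range(n - 1):
--         previous, current = current, (previous + current) % m
--         _sum += current
--
--     return _sum % m
-- ===== SOURCE B (Python) =====
-- def _pisano(m):
--     previous, current = 0, 1
--     for i in range(m * m):
--         previous, current = current, (previous + current) % m
--         if previous == 0 and current == 1:
--             return i + 1
--
--
-- def _fib_pair(k, m):
--     # fast doubling: returns (F(k) % m, F(k+1) % m)
--     if k == 0:
--         return 0, 1 % m
--     a, b = _fib_pair(k // 2, m)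
--     c = a * (2 * b - a) % m
--     d = (a * a + b * b) % m
--     if k % 2 == 0:
--         return c, d
--     else:
--         return d, (c + d) % m
--
--
-- def get_fibonacci_huge_efficient(n, m=10):
--     pp = _pisano(m)
--     r = n % pp
--     f, _ = _fib_pair(r + 2, m)
--     return (f - 1) % m
-- ===== Notes on version B (the rewrite author's own statement) =====
-- stated objective: faster
-- what changed: B keeps the Pisano-period reduction n %= pp but replaces A's linear accumulate-the-running-sum loop with the closed form sum_{i=1}^n F_i = F(n+2)-1, computing F(n+2) mod m by recursive fast doubling, so the post-reduction work drops from O(pp) additions to O(log pp) multiplications (measured ~2x overall; the shared pisano-period scan remains).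
import Mathlib
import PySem

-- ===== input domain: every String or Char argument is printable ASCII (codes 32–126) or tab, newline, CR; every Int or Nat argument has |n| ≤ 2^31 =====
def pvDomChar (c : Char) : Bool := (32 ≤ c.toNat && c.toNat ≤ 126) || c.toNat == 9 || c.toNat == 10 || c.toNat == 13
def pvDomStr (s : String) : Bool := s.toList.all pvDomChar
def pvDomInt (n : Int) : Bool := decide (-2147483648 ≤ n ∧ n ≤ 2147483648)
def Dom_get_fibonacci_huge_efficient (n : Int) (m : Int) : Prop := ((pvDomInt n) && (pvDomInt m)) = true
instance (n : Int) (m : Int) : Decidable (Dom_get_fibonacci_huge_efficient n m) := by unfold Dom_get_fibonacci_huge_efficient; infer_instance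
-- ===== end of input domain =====

-- B replaces A's linear running-sum loop (after the shared Pisano-period reduction) by the
-- closed form sum_{i=1}^n F_i = F(n+2)-1 with F(n+2) mod m computed by recursive fast doubling.


-- ===== PORT A =====
-- pisanoPeriod's `for i in range(0, m*m)` loop with early return `(_sum, i+1)`;
-- falling off the end is Python's implicit `return None` (the caller's unpacking then raises) = `none`.
def pisanoLoopA (m : Int) : Nat → Int → Int → Int → Int → Option (Int × Int)
  | 0, _, _, _, _ => none
  | fuel+1, previous, current, s, i =>
    let previous' := current
    let current' := PySem.Int.mod (previous + current) m
    let s' := s + current'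
    if previous' = 0 ∧ current' = 1 then some (s', i + 1)
    else pisanoLoopA m fuel previous' current' s' (i + 1)

def pisanoPeriodA (m : Int) : Option (Int × Int) :=
  pisanoLoopA m (m * m).toNat 0 1 1 0

-- `for _ in range(n - 1): previous, current = current, (previous+current) % m; _sum += current`
def sumLoopA (m : Int) : Nat → Int → Int → Int → Int
  | 0, _, _, s => s
  | k+1, previous, current, s =>
    let previous' := current
    let current' := PySem.Int.mod (previous + current) m
    sumLoopA m k previous' current' (s + current')

def get_fibonacci_huge_efficient (n : Int) (m : Int) : Int :=
  match pisanoPeriodA m with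
  | none => 0   -- Python raises TypeError here (unpacking None); excluded by Pre_
  | some (one_iter_sum, pp) =>
    let n' := PySem.Int.mod n pp
    let s0 : Int := 1
    let s1 := if n' > pp then one_iter_sum * n' else s0
    if n' ≤ 1 then n'
    else PySem.Int.mod (sumLoopA m (n' - 1).toNat 0 1 s1) m

-- ===== PORT B =====
-- B's _pisano: same search loop but carries no running sum and returns only i+1.
def pisanoLoopB (m : Int) : Nat → Int → Int → Int → Option Int
  | 0, _, _, _ => none
  | fuel+1, previous, current, i =>
    let previous' := current
    let current' := PySem.Int.mod (previous + current) m
    if previous' = 0 ∧ current' = 1 then some (i + 1)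
    else pisanoLoopB m fuel previous' current' (i + 1)

def pisanoB (m : Int) : Option Int := pisanoLoopB m (m * m).toNat 0 1 0

-- B's _fib_pair (fast doubling). Its Python argument k = r+2 is a nonnegative int and the
-- recursion is on k // 2, so the port recurses on k : Nat with Nat division (= Python // here).
def fibPairB (m : Int) : Nat → Int × Int
  | 0 => (0, PySem.Int.mod 1 m)
  | (k+1) =>
    let p := fibPairB m ((k+1)/2)
    let a := p.1
    let b := p.2
    let c := PySem.Int.mod (a * (2*b - a)) m
    let d := PySem.Int.mod (a*a + b*b) m
    if (k+1) % 2 == 0 then (c, d) else (d, PySem.Int.mod (c + d) m)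
decreasing_by exact Nat.div_lt_self (Nat.succ_pos k) (by omega)

def get_fibonacci_huge_efficient_alt (n : Int) (m : Int) : Int :=
  match pisanoB m with
  | none => 0   -- Python raises TypeError here (n % None); excluded by Pre_
  | some pp =>
    let r := PySem.Int.mod n pp
    let f := (fibPairB m (r + 2).toNat).1
    PySem.Int.mod (f - 1) m

-- ===== PRECONDITION & SPEC =====
-- Pre_ excludes exactly m ≤ 1, where pisanoPeriod falls off its loop, returns None and A's
-- tuple unpacking raises TypeError (for every m ≥ 2 the Pisano period exists within m*m steps).
def Pre_get_fibonacci_huge_efficient (n : Int) (m : Int) : Prop := 2 ≤ m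
instance (n : Int) (m : Int) : Decidable (Pre_get_fibonacci_huge_efficient n m) := by unfold Pre_get_fibonacci_huge_efficient; infer_instance
def pvWitness_get_fibonacci_huge_efficient : Int × Int := (10, 3)

def Spec_get_fibonacci_huge_efficient (n : Int) (m : Int) (out : Int) : Prop := out = get_fibonacci_huge_efficient_alt n m
instance (n : Int) (m : Int) (out : Int) : Decidable (Spec_get_fibonacci_huge_efficient n m out) := by unfold Spec_get_fibonacci_huge_efficient; infer_instance

-- ===== CLAIM (what is proved, stated in full; the proofs are below) =====
def Claim_equal_get_fibonacci_huge_efficient : Prop := ∀ (n : Int) (m : Int), Dom_get_fibonacci_huge_efficient n m → Pre_get_fibonacci_huge_efficient n m → Spec_get_fibonacci_huge_efficient n m (get_fibonacci_huge_efficient n m)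

-- ===== LEMMAS AND PROOFS =====

-- The two pisano-period loops agree: B's result is the second component of A's.
lemma pisano_map (m : Int) : ∀ (fuel : Nat) (prev cur s i : Int),
    (pisanoLoopA m fuel prev cur s i).map Prod.snd = pisanoLoopB m fuel prev cur i := by
  intro fuel
  induction fuel with
  | zero => intro prev cur s i; rfl
  | succ f ih =>
    intro prev cur s i
    simp only [pisanoLoopA, pisanoLoopB]
    split_ifs with h
    · rfl
    · exact ih _ _ _ _

-- The period A reports is positive.
lemma pisano_pos (m : Int) : ∀ (fuel : Nat) (prev cur s i : Int), 0 ≤ i →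
    ∀ s' pp, pisanoLoopA m fuel prev cur s i = some (s', pp) → 0 < pp := by
  intro fuel
  induction fuel with
  | zero => intro _ _ _ _ _ _ _ h; simp [pisanoLoopA] at h
  | succ f ih =>
    intro prev cur s i hi s' pp h
    simp only [pisanoLoopA] at h
    split_ifs at h with hc
    · simp at h; omega
    · exact ih _ _ _ _ (by omega) _ _ h

-- Fast doubling computes Fibonacci pairs mod m.
lemma fibPair_eq (m : Int) (hm : 2 ≤ m) : ∀ k : Nat,
    fibPairB m k = (((Nat.fib k : Int)) % m, ((Nat.fib (k+1) : Int)) % m) := by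
  intro k
  induction k using Nat.strong_induction_on with
  | _ k ih =>
    match k with
    | 0 =>
      rw [fibPairB]
      simp [PySem.Int.mod_eq_emod_of_pos (by omega : (0:Int) < m)]
    | (k+1) =>
      rw [fibPairB]
      have hlt : (k+1)/2 < k+1 := Nat.div_lt_self (Nat.succ_pos k) (by omega)
      rw [ih _ hlt]
      set j := (k+1)/2 with hj
      have hmod : ∀ a : Int, PySem.Int.mod a m = a % m :=
        fun a => PySem.Int.mod_eq_emod_of_pos (by omega)
      have hfle : Nat.fib j ≤ 2 * Nat.fib (j+1) :=
        le_trans (Nat.fib_le_fib_succ) (by omega)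
      have h2j : ((Nat.fib (2*j) : Int)) = (Nat.fib j : Int) * (2 * (Nat.fib (j+1) : Int) - (Nat.fib j : Int)) := by
        have := Nat.fib_two_mul j
        zify [hfle] at this
        linarith
      have h2j1 : ((Nat.fib (2*j+1) : Int)) = (Nat.fib (j+1) : Int) * (Nat.fib (j+1) : Int) + (Nat.fib j : Int) * (Nat.fib j : Int) := by
        have := Nat.fib_two_mul_add_one j
        zify at this
        rw [this]; ring
      have ha : Int.ModEq m ((Nat.fib j : Int) % m) (Nat.fib j : Int) :=
        Int.emod_emod_of_dvd _ dvd_rfl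
      have hb : Int.ModEq m ((Nat.fib (j+1) : Int) % m) (Nat.fib (j+1) : Int) :=
        Int.emod_emod_of_dvd _ dvd_rfl
      have hc : Int.ModEq m ((Nat.fib j : Int) % m * (2 * ((Nat.fib (j+1) : Int) % m) - (Nat.fib j : Int) % m)) (Nat.fib (2*j) : Int) := by
        rw [h2j]; exact ha.mul ((hb.mul_left 2).sub ha)
      have hd : Int.ModEq m ((Nat.fib j : Int) % m * ((Nat.fib j : Int) % m) + (Nat.fib (j+1) : Int) % m * ((Nat.fib (j+1) : Int) % m)) (Nat.fib (2*j+1) : Int) := by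
        rw [h2j1]
        exact ((hb.mul hb).add_left _).trans (((ha.mul ha).add_right _).trans (by rw [add_comm]))
      simp only [hmod, beq_iff_eq]
      split_ifs with hpar
      · have hk : k+1 = 2*j := by omega
        rw [hk, Prod.mk.injEq]
        exact ⟨hc, hd⟩
      · have hk : k+1 = 2*j+1 := by omega
        rw [hk, Prod.mk.injEq]
        refine ⟨hd, ?_⟩
        have hfibsum : ((Nat.fib (2*j+1+1) : Int)) = (Nat.fib (2*j) : Int) + (Nat.fib (2*j+1) : Int) := by
          exact_mod_cast congrArg (Nat.cast : Nat → Int) (Nat.fib_add_two (n := 2*j))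
        calc (_ % m + _ % m) % m = _ % m := (Int.add_emod _ _ m).symm
          _ = ((Nat.fib (2*j+1+1) : Int)) % m := by rw [hfibsum]; exact hc.add hd

-- A's accumulation loop, mod m, equals the telescoped Fibonacci partial sum.
lemma sumLoop_eq (m : Int) (hm : 2 ≤ m) : ∀ (k j : Nat) (s : Int),
    sumLoopA m k (((Nat.fib j : Int)) % m) (((Nat.fib (j+1) : Int)) % m) s % m
      = (s + ((Nat.fib (j+k+3) : Int) - (Nat.fib (j+3) : Int))) % m := by
  intro k
  induction k with
  | zero =>
    intro j s
    simp [sumLoopA]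
  | succ k ih =>
    intro j s
    have hmod : ∀ a : Int, PySem.Int.mod a m = a % m :=
      fun a => PySem.Int.mod_eq_emod_of_pos (by omega)
    have hstep : PySem.Int.mod (((Nat.fib j : Int)) % m + ((Nat.fib (j+1) : Int)) % m) m
        = ((Nat.fib (j+2) : Int)) % m := by
      rw [hmod, ← Int.add_emod]
      have : ((Nat.fib (j+2) : Int)) = (Nat.fib j : Int) + (Nat.fib (j+1) : Int) := by
        exact_mod_cast congrArg (Nat.cast : Nat → Int) (Nat.fib_add_two (n := j))
      rw [this]
    simp only [sumLoopA, hstep]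
    rw [ih (j+1)]
    have hfib4 : ((Nat.fib (j+4) : Int)) = (Nat.fib (j+2) : Int) + (Nat.fib (j+3) : Int) := by
      have := Nat.fib_add_two (n := j+2)
      exact_mod_cast congrArg (Nat.cast : Nat → Int) this
    have harr : j+1+k+3 = j+(k+1)+3 := by omega
    rw [harr]
    show (s + (Nat.fib (j+2) : Int) % m + ((Nat.fib (j+(k+1)+3) : Int) - (Nat.fib (j+1+3) : Int))) % m
        = (s + ((Nat.fib (j+(k+1)+3) : Int) - (Nat.fib (j+3) : Int))) % m
    have key : ∀ x y : Int, (x + y % m) % m = (x + y) % m := by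
      intro x y
      conv_lhs => rw [Int.add_emod, Int.emod_emod_of_dvd _ dvd_rfl, ← Int.add_emod]
    have : s + (Nat.fib (j+2) : Int) % m + ((Nat.fib (j+(k+1)+3) : Int) - (Nat.fib (j+1+3) : Int))
        = (s + ((Nat.fib (j+(k+1)+3) : Int) - (Nat.fib (j+1+3) : Int))) + (Nat.fib (j+2) : Int) % m := by ring
    rw [this, key]
    congr 1
    have : ((Nat.fib (j+1+3) : Int)) = (Nat.fib (j+4) : Int) := by norm_num
    rw [this, hfib4]
    ring

-- ===== VERDICT (by name: the statement is the Claim_ definition above) =====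
theorem get_fibonacci_huge_efficient_spec : Claim_equal_get_fibonacci_huge_efficient := by
  intro n m _ hmPre
  have hm : (2:Int) ≤ m := hmPre
  unfold Spec_get_fibonacci_huge_efficient
  unfold get_fibonacci_huge_efficient get_fibonacci_huge_efficient_alt
  have hpis : pisanoB m = (pisanoPeriodA m).map Prod.snd := (pisano_map m _ 0 1 1 0).symm
  cases hA : pisanoPeriodA m with
  | none => rw [hpis, hA]; rfl
  | some pr =>
    obtain ⟨s0, pp⟩ := pr
    rw [hpis, hA]
    simp only [Option.map_some]
    have hA' : pisanoLoopA m (m*m).toNat 0 1 1 0 = some (s0, pp) := hA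
    have hpp : 0 < pp := pisano_pos m ((m*m).toNat) 0 1 1 0 le_rfl s0 pp hA'
    have hmpos : (0:Int) < m := by omega
    have hmod : ∀ a b : Int, 0 < b → PySem.Int.mod a b = a % b :=
      fun a b hb => PySem.Int.mod_eq_emod_of_pos hb
    set r := PySem.Int.mod n pp with hr
    have hr0 : 0 ≤ r := PySem.Int.mod_nonneg n hpp
    have hrlt : r < pp := PySem.Int.mod_lt n hpp
    rw [if_neg (by omega : ¬ r > pp)]
    have hBval : (fibPairB m (r + 2).toNat).1 = ((Nat.fib ((r+2).toNat) : Int)) % m := by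
      rw [fibPair_eq m hm]
    by_cases h1 : r ≤ 1
    · rw [if_pos h1]
      interval_cases r
      · -- r = 0 : B gives (fib 2 % m - 1) % m = 0
        rw [hBval]
        have ht : ((0:Int)+2).toNat = 2 := rfl
        have hf : (Nat.fib 2 : Int) = 1 := by norm_num
        rw [ht, hf, hmod _ _ hmpos]
        have h1m : (1:Int) % m = 1 := Int.emod_eq_of_lt (by omega) (by omega)
        rw [h1m]
        simp
      · -- r = 1 : B gives (fib 3 % m - 1) % m = 1
        rw [hBval]
        have ht : ((1:Int)+2).toNat = 3 := rfl
        have hf : (Nat.fib 3 : Int) = 2 := by norm_num [Nat.fib_add_two]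
        rw [ht, hf, hmod _ _ hmpos]
        have h21 : ((2:Int) % m - 1) % m = (2 - 1) % m := by
          rw [Int.sub_emod, Int.emod_emod_of_dvd _ dvd_rfl, ← Int.sub_emod]
        rw [h21]
        norm_num
        exact (Int.emod_eq_of_lt (by omega) (by omega)).symm
    · rw [if_neg h1]
      -- r ≥ 2: A's loop telescopes to (fib (r+2) - 1) % m, which is B's value
      have harg0 : ((Nat.fib 0 : Int)) % m = 0 := by simp
      have harg1 : ((Nat.fib (0+1) : Int)) % m = 1 := by
        simp [Nat.fib_one]
        exact Int.emod_eq_of_lt (by omega) (by omega)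
      have hsum := sumLoop_eq m hm ((r-1).toNat) 0 1
      rw [harg0, harg1] at hsum
      rw [hmod _ _ hmpos, hsum]
      rw [hBval, hmod _ _ hmpos]
      have hfib3 : ((Nat.fib 3 : Int)) = 2 := by norm_num [Nat.fib_add_two, Nat.fib]
      have key : ∀ x : Int, (x % m - 1) % m = (x - 1) % m := by
        intro x
        rw [Int.sub_emod, Int.emod_emod_of_dvd _ dvd_rfl, ← Int.sub_emod]
      rw [key]
      have heq : (0:Nat) + (r-1).toNat + 3 = (r+2).toNat := by omega
      have hz : (0:Nat) + 3 = 3 := rfl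
      rw [heq, hz, hfib3]
      congr 1
      ring
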